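-- pv_equiv track=rewrite | github.com/suryajithac/Python-Tutorial | Tutorial 2/question05.py | slice_string
-- ===== SOURCE A (Python) =====
-- def slice_string(s):
--     odd_chars = ""
--     even_chars = ""
--     for i in range(len(s)):
--         if i % 2 == 0:
--             odd_chars += s[i]
--         else:
--             even_chars += s[i]
--     return odd_chars, even_chars
-- ===== SOURCE B (Python) =====
-- def slice_string(s):
--     return s[::2], s[1::2]
-- ===== Notes on version B (the rewrite author's own statement) =====
-- stated objective: simpler
-- what changed: Replaces the index loop with its parity branch and two string accumulators by two strided slices s[::2] and s[1::2] returned directly.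
import Mathlib
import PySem

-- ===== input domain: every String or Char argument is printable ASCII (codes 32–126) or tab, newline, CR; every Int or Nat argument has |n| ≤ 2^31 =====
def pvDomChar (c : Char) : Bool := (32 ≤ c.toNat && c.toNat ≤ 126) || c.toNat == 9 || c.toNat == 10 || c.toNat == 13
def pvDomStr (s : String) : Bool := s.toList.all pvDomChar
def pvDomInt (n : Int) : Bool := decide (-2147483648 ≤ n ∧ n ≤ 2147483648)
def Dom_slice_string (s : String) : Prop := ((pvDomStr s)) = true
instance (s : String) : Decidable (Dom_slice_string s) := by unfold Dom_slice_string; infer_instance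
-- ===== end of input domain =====

-- B replaces A's index loop, parity branch and two string accumulators by two strided slices s[::2], s[1::2] (simpler).


-- ===== PORT A =====
-- for i in range(len(s)): if i % 2 == 0: odd_chars += s[i] else: even_chars += s[i]
-- (s[i] ported as pyGetD on the code points: i drawn from range(len(s)) is always in range)
def slice_string (s : String) : String × String :=
  (PySem.List.pyRange 0 (PySem.Str.len s) 1).foldl
    (fun (p : String × String) i =>
      if PySem.Int.mod i 2 = 0 then
        (p.1 ++ String.singleton (PySem.List.pyGetD s.toList i ' '), p.2)
      else
        (p.1, p.2 ++ String.singleton (PySem.List.pyGetD s.toList i ' ')))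
    ("", "")

-- ===== PORT B =====
-- return s[::2], s[1::2]
def slice_string_alt (s : String) : String × String :=
  ((PySem.Str.slice? s none none 2).getD "", (PySem.Str.slice? s (some 1) none 2).getD "")

-- ===== PRECONDITION & SPEC =====
def Spec_slice_string (s : String) (out : String × String) : Prop := out = slice_string_alt s
instance (s : String) (out : String × String) : Decidable (Spec_slice_string s out) := by unfold Spec_slice_string; infer_instance

-- ===== CLAIM (what is proved, stated in full; the proofs are below) =====
def Claim_equal_slice_string : Prop := ∀ (s : String), Dom_slice_string s → Spec_slice_string s (slice_string s)

-- ===== LEMMAS AND PROOFS =====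

-- the even-index characters of a list
def pvEvens : List Char → List Char
  | [] => []
  | [a] => [a]
  | a :: _ :: t => a :: pvEvens t

theorem pvEvens_cons (a : Char) (t : List Char) : pvEvens (a :: t) = a :: pvEvens t.tail := by
  cases t <;> rfl

theorem pvFilterMap_get2 (l : List Char) :
    ∀ m : Nat, l.length ≤ 2 * m →
      List.filterMap (fun k => l[2 * k]?) (List.range m) = pvEvens l := by
  induction l using pvEvens.induct with
  | case1 =>
    intro m _
    simp [pvEvens]
  | case2 a =>
    intro m hm
    obtain ⟨m', rfl⟩ : ∃ m', m = m' + 1 := ⟨m - 1, by simp at hm; omega⟩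
    rw [List.range_succ_eq_map, List.filterMap_cons, List.filterMap_map]
    have hnone : ∀ k : Nat, ([a][2 * (k + 1)]?) = (none : Option Char) := by
      intro k
      rw [show 2 * (k + 1) = 2 * k + 1 + 1 by ring]
      simp
    simp only [Function.comp_def, hnone]
    simp [pvEvens]
  | case3 a b t ih =>
    intro m hm
    obtain ⟨m', rfl⟩ : ∃ m', m = m' + 1 := ⟨m - 1, by simp at hm; omega⟩
    rw [List.range_succ_eq_map, List.filterMap_cons, List.filterMap_map]
    have hstep : ∀ k : Nat, ((a :: b :: t)[2 * (k + 1)]?) = t[2 * k]? := by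
      intro k
      rw [show 2 * (k + 1) = 2 * k + 1 + 1 by ring]
      simp
    simp only [Function.comp_def, hstep]
    have hlen : t.length ≤ 2 * m' := by simp at hm; omega
    simp [ih m' hlen, pvEvens]

theorem pvSlice2_zero (l : List Char) :
    PySem.List.slice? l none none 2 = some (pvEvens l) := by
  simp only [PySem.List.slice?, PySem.List.sliceIndices]
  norm_num
  have hf : (fun x : Nat => l[(2 * (x:Int)).toNat]?) = fun x => l[2 * x]? := by
    funext x
    have h2 : ((2 * (x:Int)).toNat) = 2 * x := by omega
    rw [h2]
  rw [hf]
  apply pvFilterMap_get2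
  split_ifs <;> omega

theorem pvSlice2_one (l : List Char) :
    PySem.List.slice? l (some 1) none 2 = some (pvEvens l.tail) := by
  cases l with
  | nil => rfl
  | cons a t =>
    simp only [PySem.List.slice?, PySem.List.sliceIndices]
    norm_num
    have hf : (fun x : Nat => (a :: t)[(1 + 2 * (x:Int)).toNat]?) = fun x => t[2 * x]? := by
      funext x
      have h2 : ((1 + 2 * (x:Int)).toNat) = 2 * x + 1 := by omega
      rw [h2, List.getElem?_cons_succ]
    rw [hf]
    apply pvFilterMap_get2
    split_ifs <;> omega

def pvStep (p : String × String) (q : Int × Char) : String × String :=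
  if PySem.Int.mod q.1 2 = 0 then (p.1 ++ String.singleton q.2, p.2)
  else (p.1, p.2 ++ String.singleton q.2)

theorem pvModSucc (j : Int) : PySem.Int.mod (j + 1) 2 = 0 ↔ ¬ PySem.Int.mod j 2 = 0 := by
  simp [PySem.Int.mod, Int.fmod_eq_emod]
  omega

theorem pvLoopA (l : List Char) :
    ∀ (j : Int) (o e : String),
      (PySem.List.enumerate l j).foldl pvStep (o, e) =
        if PySem.Int.mod j 2 = 0 then
          (o ++ String.ofList (pvEvens l), e ++ String.ofList (pvEvens l.tail))
        else
          (o ++ String.ofList (pvEvens l.tail), e ++ String.ofList (pvEvens l)) := by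
  induction l with
  | nil =>
    intro j o e
    split_ifs <;> simp [PySem.List.enumerate, pvEvens]
  | cons a t ih =>
    intro j o e
    rw [PySem.List.enumerate_cons, List.foldl_cons, ih (j + 1)]
    by_cases h : PySem.Int.mod j 2 = 0
    · have h1 : ¬ PySem.Int.mod (j + 1) 2 = 0 := by rw [pvModSucc]; exact not_not_intro h
      simp only [pvStep, h, h1, if_pos, if_false, pvEvens_cons, List.tail_cons]
      refine Prod.ext ?_ rfl
      apply String.ext; simp
    · have h1 : PySem.Int.mod (j + 1) 2 = 0 := (pvModSucc j).mpr h
      simp only [pvStep, h, h1, if_pos, if_false, pvEvens_cons, List.tail_cons]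
      refine Prod.ext rfl ?_
      apply String.ext; simp

-- ===== VERDICT (by name: the statement is the Claim_ definition above) =====
theorem slice_string_spec : Claim_equal_slice_string := by
  intro s _
  unfold Spec_slice_string
  have hA : slice_string s = (PySem.List.enumerate s.toList 0).foldl pvStep ("", "") := by
    rw [slice_string, PySem.List.enumerate_eq_map_pyRange s.toList ' ', List.foldl_map]
    rfl
  have hB : slice_string_alt s =
      (String.ofList (pvEvens s.toList), String.ofList (pvEvens s.toList.tail)) := by
    rw [slice_string_alt]
    simp [PySem.Str.slice?, pvSlice2_zero, pvSlice2_one]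
  have h0 : PySem.Int.mod 0 2 = 0 := by decide
  rw [hA, hB, pvLoopA, if_pos h0]
  refine Prod.ext ?_ ?_ <;> apply String.ext <;> simp
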